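-- pv_equiv track=rewrite | github.com/joke2k/faker | faker/providers/ssn/ar_DZ/__init__.py | _control_key
-- ===== SOURCE A (Python) =====
-- def _control_key(base: str) -> str:
--     """Compute the 2-digit control key via modified Luhn over 16 digits."""
--     total, alternate = 0, False
--     for i in range(len(base) - 1, -1, -1):
--         d = int(base[i]) * (2 if alternate else 1)
--         total += d - 9 if d > 9 else d
--         alternate = not alternate
--     remainder = total % 10
--     return f"{(0 if remainder == 0 else 10 - remainder):02d}"
-- ===== SOURCE B (Python) =====
-- def _control_key(base: str) -> str:
--     """Compute the 2-digit control key via modified Luhn over 16 digits."""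
--     total = 0
--     digits = [int(c) for c in base]
--     while digits:
--         total += digits.pop()
--         if digits:
--             d = 2 * digits.pop()
--             total += d - 9 if d > 9 else d
--     remainder = total % 10
--     return f"{(0 if remainder == 0 else 10 - remainder):02d}"
-- ===== Notes on version B (the rewrite author's own statement) =====
-- stated objective: simpler
-- what changed: Replaces the reverse index loop with an alternating boolean flag by a while loop that pops one plain and one doubled digit per iteration from a digit list, eliminating the parity state.
import Mathlib
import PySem

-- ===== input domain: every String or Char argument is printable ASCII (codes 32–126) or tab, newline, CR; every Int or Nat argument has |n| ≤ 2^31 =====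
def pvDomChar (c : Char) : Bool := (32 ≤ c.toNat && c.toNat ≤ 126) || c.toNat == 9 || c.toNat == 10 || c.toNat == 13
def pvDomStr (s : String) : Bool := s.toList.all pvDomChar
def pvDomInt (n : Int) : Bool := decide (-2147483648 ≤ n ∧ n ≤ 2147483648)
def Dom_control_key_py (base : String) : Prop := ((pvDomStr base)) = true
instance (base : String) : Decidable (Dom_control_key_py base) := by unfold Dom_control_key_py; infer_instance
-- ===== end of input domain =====

-- B replaces A's reverse index loop with an alternate flag by a while loop popping two
-- digits per iteration from the right (no parity state); objective: simpler decomposition.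

-- shared helper: port of int(c) on a single char — exact on digit chars, the only chars
-- Pre_ admits (Python's int raises ValueError on any other single printable char)
def pvDig (c : Char) : Int := (c.toNat : Int) - 48

-- port of f"{n:02d}" — exact for any Int of width ≥ 1 (negative values are already ≥ 2 wide)
def pvFmt02 (n : Int) : String :=
  let s := PySem.Int.toStr n
  if s.toList.length < 2 then String.ofList ('0' :: s.toList) else s

-- ===== PORT A =====
def control_key_py (base : String) : String :=
  let l := base.toList
  let st := (PySem.List.pyRange (PySem.Str.len base - 1) (-1) (-1)).foldl
    (fun (s : Int × Bool) i =>
      let d := pvDig (PySem.List.pyGetD l i '0') * (if s.2 then 2 else 1)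
      (s.1 + (if d > 9 then d - 9 else d), !s.2))
    ((0 : Int), false)
  let remainder := PySem.Int.mod st.1 10
  pvFmt02 (if remainder = 0 then 0 else 10 - remainder)

-- ===== PORT B =====
-- the while/pop loop of Source B: popping from the end of `digits` is structural recursion
-- on the reversed digit list, consuming one or two elements per iteration
def pvGo : List Int → Int
  | [] => 0
  | [a] => a
  | a :: b :: t => a + (if 2 * b > 9 then 2 * b - 9 else 2 * b) + pvGo t

def control_key_py_alt (base : String) : String :=
  let digits := base.toList.map pvDig
  let total := pvGo digits.reverse
  let remainder := PySem.Int.mod total 10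
  pvFmt02 (if remainder = 0 then 0 else 10 - remainder)

-- ===== PRECONDITION & SPEC =====
-- Pre_ excludes exactly the inputs containing a non-digit character, on which both A and B
-- raise ValueError (int() on a non-digit char); A returns normally on all digit strings.
def Pre_control_key_py (base : String) : Prop := (base.toList.all (fun c => ['0','1','2','3','4','5','6','7','8','9'].contains c)) = true
instance (base : String) : Decidable (Pre_control_key_py base) := by unfold Pre_control_key_py; infer_instance
def pvWitness_control_key_py : String := "1234567890123456"
def Spec_control_key_py (base : String) (out : String) : Prop := out = control_key_py_alt base
instance (base : String) (out : String) : Decidable (Spec_control_key_py base out) := by unfold Spec_control_key_py; infer_instance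

-- ===== CLAIM (what is proved, stated in full; the proofs are below) =====
def Claim_equal_control_key_py : Prop := ∀ (base : String), Dom_control_key_py base → Pre_control_key_py base → Spec_control_key_py base (control_key_py base)

-- ===== LEMMAS AND PROOFS =====

lemma pvDig_le (c : Char) (h : c ∈ ['0','1','2','3','4','5','6','7','8','9']) : pvDig c ≤ 9 := by
  fin_cases h <;> decide

-- A's alternating-flag fold over a list of digit values equals B's two-at-a-time recursion
lemma fold_go : ∀ (xs : List Int) (t : Int), (∀ a ∈ xs, a ≤ 9) →
    (xs.foldl (fun (s : Int × Bool) a =>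
      (s.1 + (if a * (if s.2 then 2 else 1) > 9 then a * (if s.2 then 2 else 1) - 9
              else a * (if s.2 then 2 else 1)), !s.2)) (t, false)).1
    = t + pvGo xs := by
  intro xs
  induction xs using pvGo.induct with
  | case1 =>
    intro t _; simp [pvGo]
  | case2 a =>
    intro t hx
    have ha := hx a (by simp)
    simp [pvGo, List.foldl]
    omega
  | case3 a b tl ih =>
    intro t hx
    have ha := hx a (by simp)
    have h2 : ∀ x ∈ tl, x ≤ 9 := fun x hx' => hx x (by simp [hx'])
    simp only [List.foldl_cons, Bool.not_false, Bool.not_true, Bool.false_eq_true,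
      if_false, mul_one]
    rw [ih _ h2]
    show t + _ + _ + pvGo tl = t + (a + (if 2 * b > 9 then 2 * b - 9 else 2 * b) + pvGo tl)
    split_ifs <;> omega

theorem control_key_py_spec : Claim_equal_control_key_py := by
  intro base _ hpre
  unfold Spec_control_key_py control_key_py control_key_py_alt
  simp only [PySem.Str.len_eq]
  have hrange : PySem.List.pyRange ((base.toList.length : Int) - 1) (-1) (-1)
      = (PySem.List.pyRange 0 (PySem.List.len base.toList)).reverse := by
    rw [PySem.List.pyRange_neg_one_eq_reverse]
    norm_num [PySem.List.len]
  rw [hrange]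
  have hmap : (PySem.List.pyRange 0 (PySem.List.len base.toList)).reverse.map
      (fun i => pvDig (PySem.List.pyGetD base.toList i '0'))
      = (base.toList.map pvDig).reverse := by
    rw [List.map_reverse]
    congr 1
    rw [show (fun i => pvDig (PySem.List.pyGetD base.toList i '0'))
        = pvDig ∘ (fun j => PySem.List.pyGetD base.toList j '0') from rfl]
    rw [← List.map_map]
    rw [PySem.List.map_pyGetD_pyRange_zero]
  have hfold1 :
      ((PySem.List.pyRange 0 (PySem.List.len base.toList)).reverse.foldl
        (fun (s : Int × Bool) i =>
          (s.1 + (if pvDig (PySem.List.pyGetD base.toList i '0') * (if s.2 then 2 else 1) > 9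
                  then pvDig (PySem.List.pyGetD base.toList i '0') * (if s.2 then 2 else 1) - 9
                  else pvDig (PySem.List.pyGetD base.toList i '0') * (if s.2 then 2 else 1)), !s.2))
        ((0 : Int), false))
      = (((PySem.List.pyRange 0 (PySem.List.len base.toList)).reverse.map
            (fun i => pvDig (PySem.List.pyGetD base.toList i '0'))).foldl
          (fun (s : Int × Bool) a =>
            (s.1 + (if a * (if s.2 then 2 else 1) > 9 then a * (if s.2 then 2 else 1) - 9
                    else a * (if s.2 then 2 else 1)), !s.2))
          ((0 : Int), false)) := by
    rw [List.foldl_map]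
  have hx : ∀ a ∈ (base.toList.map pvDig).reverse, a ≤ 9 := by
    intro a ha
    simp only [List.mem_reverse, List.mem_map] at ha
    obtain ⟨c, hc, rfl⟩ := ha
    exact pvDig_le c (by simpa using List.all_eq_true.mp hpre c hc)
  have key :
      ((PySem.List.pyRange 0 (PySem.List.len base.toList)).reverse.foldl
        (fun (s : Int × Bool) i =>
          (s.1 + (if pvDig (PySem.List.pyGetD base.toList i '0') * (if s.2 then 2 else 1) > 9
                  then pvDig (PySem.List.pyGetD base.toList i '0') * (if s.2 then 2 else 1) - 9
                  else pvDig (PySem.List.pyGetD base.toList i '0') * (if s.2 then 2 else 1)), !s.2))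
        ((0 : Int), false)).1
      = pvGo ((base.toList.map pvDig).reverse) := by
    rw [hfold1, hmap, fold_go _ 0 hx, zero_add]
  rw [key]
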